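-- pv_equiv track=rewrite | github.com/Mizan-AI-Org/Mizan_BE | scheduling/schedule_document_service.py | _header_score
-- ===== SOURCE A (Python) =====
-- from typing import Any, Dict, List, Optional, Tuple
--
-- NAME_KEYS = ("name", "employee", "staff", "full name", "fullname", "worker", "person")
--
-- ROLE_KEYS = ("role", "position", "title", "job", "function", "type")
--
-- DATE_KEYS = ("date", "day", "schedule date", "shift date", "dátum")
--
-- START_KEYS = ("start", "in", "from", "begin", "clock in", "start time", "time in")
--
-- END_KEYS = ("end", "out", "to", "finish", "clock out", "end time", "time out")
--
-- DEPT_KEYS = ("department", "dept", "section", "area")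
--
-- def _normalize_header(h: str) -> str:
--     return (h or "").strip().lower().replace("_", " ").replace("-", " ")
--
-- def _map_headers(headers: List[str]) -> Dict[str, int]:
--     """Return mapping: our_key -> column index (0-based)."""
--     out: Dict[str, int] = {}
--     for idx, h in enumerate(headers):
--         n = _normalize_header(str(h))
--         if not n:
--             continue
--         if any(k in n for k in NAME_KEYS) and "name" not in out:
--             out["name"] = idx
--         if any(k in n for k in ROLE_KEYS) and "role" not in out:
--             out["role"] = idx
--         if any(k in n for k in DATE_KEYS) and "date" not in out:
--             out["date"] = idx
--         if any(k in n for k in START_KEYS) and "start_time" not in out: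
--             out["start_time"] = idx
--         if any(k in n for k in END_KEYS) and "end_time" not in out:
--             out["end_time"] = idx
--         if any(k in n for k in DEPT_KEYS) and "department" not in out:
--             out["department"] = idx
--     return out
--
-- def _header_score(headers: List[str]) -> int:
--     """Heuristic score for a header row: higher means more recognizable schedule columns."""
--     m = _map_headers(headers)
--     score = 0
--     for k in ("name", "role", "department", "date", "start_time", "end_time"):
--         if k in m:
--             score += 1
--     # date/time are most important
--     if "date" in m:
--         score += 2
--     if "start_time" in m or "end_time" in m:
--         score += 2
--     return score
-- ===== SOURCE B (Python) =====
-- NAME_KEYS = ("name", "employee", "staff", "full name", "fullname", "worker", "person")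
-- ROLE_KEYS = ("role", "position", "title", "job", "function", "type")
-- DATE_KEYS = ("date", "day", "schedule date", "shift date", "dátum")
-- START_KEYS = ("start", "in", "from", "begin", "clock in", "start time", "time in")
-- END_KEYS = ("end", "out", "to", "finish", "clock out", "end time", "time out")
-- DEPT_KEYS = ("department", "dept", "section", "area")
--
-- _CATS = (
--     ("name", NAME_KEYS),
--     ("role", ROLE_KEYS),
--     ("date", DATE_KEYS),
--     ("start_time", START_KEYS),
--     ("end_time", END_KEYS),
--     ("department", DEPT_KEYS),
-- )
--
-- def _header_score(headers):
--     """Heuristic score for a header row: higher means more recognizable schedule columns.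
--
--     Joins all normalized headers into one '|'-separated text and searches each
--     keyword once in that combined text; this is exact because no keyword
--     contains '|', so a keyword occurs in the text iff it occurs in one header.
--     """
--     text = "|".join(str(h).strip().lower().replace("_", " ").replace("-", " ")
--                     for h in headers)
--     present = [key for key, kws in _CATS if any(k in text for k in kws)]
--     return (len(present)
--             + (2 if "date" in present else 0)
--             + (2 if "start_time" in present or "end_time" in present else 0))
-- ===== Notes on version B (the rewrite author's own statement) =====
-- stated objective: faster
-- what changed: A scans every header against every keyword in Python-level nested loops while building a first-index dict with dedup guards; B joins all normalized headers once into a single '|'-separated text and searches each keyword once in that combined text (exact because no keyword contains '|'), then scores the present categories arithmetically - one fast substring search per keyword replaces per-header keyword loops.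
import Mathlib
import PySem

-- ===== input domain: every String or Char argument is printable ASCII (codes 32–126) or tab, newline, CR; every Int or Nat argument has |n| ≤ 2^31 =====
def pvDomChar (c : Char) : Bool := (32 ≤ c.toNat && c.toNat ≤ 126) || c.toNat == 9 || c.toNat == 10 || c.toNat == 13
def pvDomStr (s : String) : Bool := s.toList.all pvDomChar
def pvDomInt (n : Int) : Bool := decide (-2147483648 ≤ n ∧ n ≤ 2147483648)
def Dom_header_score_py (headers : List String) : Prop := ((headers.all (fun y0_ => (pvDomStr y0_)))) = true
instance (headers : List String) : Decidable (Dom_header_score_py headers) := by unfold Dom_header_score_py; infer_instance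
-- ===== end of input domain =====

-- B drops A's per-header keyword scans and first-index dict: it joins all normalized
-- headers into one '|'-separated text, searches each keyword once in that combined text
-- (exact since no keyword contains '|'), and scores the present categories arithmetically.

-- ===== PORT A =====
def NAME_KEYS : List String := ["name", "employee", "staff", "full name", "fullname", "worker", "person"]
def ROLE_KEYS : List String := ["role", "position", "title", "job", "function", "type"]
def DATE_KEYS : List String := ["date", "day", "schedule date", "shift date", "dátum"]
def START_KEYS : List String := ["start", "in", "from", "begin", "clock in", "start time", "time in"]
def END_KEYS : List String := ["end", "out", "to", "finish", "clock out", "end time", "time out"]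
def DEPT_KEYS : List String := ["department", "dept", "section", "area"]

-- _normalize_header; 'h or ""' is the identity on strings but is kept literally
def pvNormalizeHeader (h : String) : String :=
  PySem.Str.replace (PySem.Str.replace (PySem.Str.lower (PySem.Str.strip (if h = "" then "" else h))) "_" " ") "-" " "

-- any(k in n for k in ks)
def pvAnyIn (ks : List String) (n : String) : Bool := ks.any (fun k => PySem.Str.isIn k n)

-- loop body of _map_headers
def pvMapStep (out : PySem.Dict String Int) (p : Int × String) : PySem.Dict String Int :=
  let n := pvNormalizeHeader p.2
  if n = "" then out
  else
    let out := if pvAnyIn NAME_KEYS n && !(out.contains "name") then out.insert "name" p.1 else out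
    let out := if pvAnyIn ROLE_KEYS n && !(out.contains "role") then out.insert "role" p.1 else out
    let out := if pvAnyIn DATE_KEYS n && !(out.contains "date") then out.insert "date" p.1 else out
    let out := if pvAnyIn START_KEYS n && !(out.contains "start_time") then out.insert "start_time" p.1 else out
    let out := if pvAnyIn END_KEYS n && !(out.contains "end_time") then out.insert "end_time" p.1 else out
    if pvAnyIn DEPT_KEYS n && !(out.contains "department") then out.insert "department" p.1 else out

def pvMapHeaders (headers : List String) : PySem.Dict String Int :=
  (PySem.List.enumerate headers).foldl pvMapStep PySem.Dict.empty

def header_score_py (headers : List String) : Int :=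
  let m := pvMapHeaders headers
  let score : Int :=
    (["name", "role", "department", "date", "start_time", "end_time"]).foldl
      (fun score k => if m.contains k then score + 1 else score) 0
  let score := if m.contains "date" then score + 2 else score
  if m.contains "start_time" || m.contains "end_time" then score + 2 else score

-- ===== PORT B =====
def pvNorm (h : String) : String :=
  PySem.Str.replace (PySem.Str.replace (PySem.Str.lower (PySem.Str.strip h)) "_" " ") "-" " "

def pvCats : List (String × List String) :=
  [("name", NAME_KEYS), ("role", ROLE_KEYS), ("date", DATE_KEYS),
   ("start_time", START_KEYS), ("end_time", END_KEYS), ("department", DEPT_KEYS)]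

def header_score_py_alt (headers : List String) : Int :=
  let text := PySem.Str.join "|" (headers.map pvNorm)
  let present := (pvCats.filter (fun c => c.2.any (fun k => PySem.Str.isIn k text))).map (·.1)
  (present.length : Int)
    + (if present.contains "date" then 2 else 0)
    + (if present.contains "start_time" || present.contains "end_time" then 2 else 0)

-- ===== PRECONDITION & SPEC =====
def Spec_header_score_py (headers : List String) (out : Int) : Prop := out = header_score_py_alt headers
instance (headers : List String) (out : Int) : Decidable (Spec_header_score_py headers out) := by unfold Spec_header_score_py; infer_instance

-- ===== CLAIM =====
def Claim_equal_header_score_py : Prop := ∀ (headers : List String), Dom_header_score_py headers → Spec_header_score_py headers (header_score_py headers)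

-- ===== LEMMAS AND PROOFS =====

-- ---- A-side characterisation: the dict contains a key iff some header matches its keyword list ----

theorem pvNorm_eq (h : String) : pvNormalizeHeader h = pvNorm h := by
  by_cases hh : h = ""
  · subst hh; rfl
  · simp [pvNormalizeHeader, pvNorm, hh]

theorem bor_and_not (x a : Bool) : (x || (a && !x)) = (x || a) := by
  cases x <;> cases a <;> rfl

theorem contains_ite_insert (d : PySem.Dict String Int) (c : Bool) (K' K : String) (v : Int) :
    (if c then d.insert K' v else d).contains K = (d.contains K || (c && (K == K'))) := by
  cases c
  · simp
  · simp [PySem.Dict.contains_insert, Bool.or_comm]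

theorem step_contains (out : PySem.Dict String Int) (p : Int × String) (K : String) (ks : List String)
    (hpair : (K, ks) ∈ [("name", NAME_KEYS), ("role", ROLE_KEYS), ("date", DATE_KEYS),
        ("start_time", START_KEYS), ("end_time", END_KEYS), ("department", DEPT_KEYS)]) :
    (pvMapStep out p).contains K = (out.contains K || pvAnyIn ks (pvNorm p.2)) := by
  rw [← pvNorm_eq]
  by_cases hn : pvNormalizeHeader p.2 = ""
  · have h0 : pvAnyIn ks (pvNormalizeHeader p.2) = false := by
      rw [hn]; fin_cases hpair <;> decide
    simp only [pvMapStep]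
    rw [if_pos hn, h0, Bool.or_false]
  · fin_cases hpair
    all_goals
      simp only [pvMapStep]
      rw [if_neg hn]
      simp only [contains_ite_insert]
      simp [bor_and_not]

theorem fold_contains (K : String) (ks : List String)
    (hstep : ∀ out p, (pvMapStep out p).contains K = (out.contains K || pvAnyIn ks (pvNorm p.2))) :
    ∀ (l : List (Int × String)) (d : PySem.Dict String Int),
      (l.foldl pvMapStep d).contains K = (d.contains K || l.any (fun p => pvAnyIn ks (pvNorm p.2))) := by
  intro l
  induction l with
  | nil => intro d; simp
  | cons p t ih => intro d; simp [List.foldl_cons, ih, hstep, Bool.or_assoc]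

theorem any_enumerate (headers : List String) (f : String → Bool) :
    (PySem.List.enumerate headers).any (fun p => f p.2) = headers.any f := by
  conv_rhs => rw [← PySem.List.map_snd_enumerate headers 0]
  rw [List.any_map]
  rfl

theorem map_contains (headers : List String) (K : String) (ks : List String)
    (hpair : (K, ks) ∈ [("name", NAME_KEYS), ("role", ROLE_KEYS), ("date", DATE_KEYS),
        ("start_time", START_KEYS), ("end_time", END_KEYS), ("department", DEPT_KEYS)]) :
    (pvMapHeaders headers).contains K = headers.any (fun h => pvAnyIn ks (pvNorm h)) := by
  unfold pvMapHeaders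
  rw [fold_contains K ks (fun out p => step_contains out p K ks hpair)]
  rw [any_enumerate headers (fun h => pvAnyIn ks (pvNorm h))]
  simp

-- ---- B-side characterisation: a '|'-free keyword is in the joined text iff in some header ----

theorem pv_prefix_sep {c : Char} (b : List Char) :
    ∀ (k u : List Char), c ∉ k → k <+: u ++ c :: b → k <+: u := by
  intro k
  induction k with
  | nil => intro u _ _; exact List.nil_prefix
  | cons d k' ih =>
    intro u hc hp
    cases u with
    | nil =>
      rw [List.nil_append, List.cons_prefix_cons] at hp
      exact absurd hp.1.symm (by simp at hc; exact hc.1)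
    | cons y u' =>
      rw [List.cons_append, List.cons_prefix_cons] at hp
      rw [List.cons_prefix_cons]
      exact ⟨hp.1, ih u' (fun h => hc (List.mem_cons_of_mem _ h)) hp.2⟩

theorem pv_infix_sep {c : Char} {k : List Char} (hc : c ∉ k) (a b : List Char) :
    k <:+: (a ++ c :: b) ↔ (k <:+: a ∨ k <:+: b) := by
  constructor
  · intro h
    induction a with
    | nil =>
      rw [List.nil_append, List.infix_cons_iff] at h
      rcases h with h | h
      · have := pv_prefix_sep b k [] hc h
        simp at this
        exact Or.inl (this ▸ List.nil_infix)
      · exact Or.inr h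
    | cons x a' ih =>
      rw [List.cons_append, List.infix_cons_iff] at h
      rcases h with h | h
      · exact Or.inl (pv_prefix_sep b k (x :: a') hc h).isInfix
      · rcases ih h with h | h
        · exact Or.inl (h.trans (List.suffix_cons x a').isInfix)
        · exact Or.inr h
  · rintro (h | h)
    · exact h.trans ⟨[], c :: b, by simp⟩
    · exact h.trans ⟨a ++ [c], [], by simp⟩

theorem pv_infix_join (k : List Char) (hk : k ≠ []) (hc : ('|' : Char) ∉ k) :
    ∀ parts : List (List Char), (k <:+: PySem.Chars.join ['|'] parts ↔ ∃ p ∈ parts, k <:+: p) := by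
  intro parts
  induction parts with
  | nil =>
    rw [PySem.Chars.join_nil]
    simp [List.infix_nil, hk]
  | cons p t ih =>
    cases t with
    | nil =>
      rw [PySem.Chars.join_singleton]
      simp
    | cons q t' =>
      rw [PySem.Chars.join_cons_cons]
      have : p ++ ['|'] ++ PySem.Chars.join ['|'] (q :: t') = p ++ '|' :: PySem.Chars.join ['|'] (q :: t') := by
        simp
      rw [this, pv_infix_sep hc, ih]
      simp

theorem pv_toList_ne_nil {k : String} (h : k ≠ "") : k.toList ≠ [] :=
  fun h0 => h (by simpa [String.ofList_toList] using congrArg String.ofList h0)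

theorem b_text_any (ks headers : List String)
    (hks : ks.all (fun k => !k.toList.isEmpty && !k.toList.contains '|') = true) :
    ks.any (fun k => PySem.Str.isIn k (PySem.Str.join "|" (headers.map pvNorm)))
      = headers.any (fun h => pvAnyIn ks (pvNorm h)) := by
  rw [Bool.eq_iff_iff]
  simp only [List.any_eq_true, pvAnyIn]
  constructor
  · rintro ⟨k, hkmem, hin⟩
    have hk := List.all_eq_true.mp hks k hkmem
    simp at hk
    rw [PySem.Str.isIn_iff_infix] at hin
    rw [PySem.Str.toList_join] at hin
    have hjoin := pv_infix_join k.toList (pv_toList_ne_nil hk.1) hk.2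
        ((headers.map pvNorm).map String.toList)
    rw [show ("|" : String).toList = ['|'] from rfl] at hin
    rcases hjoin.mp hin with ⟨p, hp, hinf⟩
    rcases List.mem_map.mp hp with ⟨n, hn, rfl⟩
    rcases List.mem_map.mp hn with ⟨h, hh, rfl⟩
    exact ⟨h, hh, k, hkmem, (PySem.Str.isIn_iff_infix k (pvNorm h)).mpr hinf⟩
  · rintro ⟨h, hh, k, hkmem, hin⟩
    have hk := List.all_eq_true.mp hks k hkmem
    simp at hk
    refine ⟨k, hkmem, ?_⟩
    rw [PySem.Str.isIn_iff_infix] at hin ⊢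
    rw [PySem.Str.toList_join, show ("|" : String).toList = ['|'] from rfl]
    exact (pv_infix_join k.toList (pv_toList_ne_nil hk.1) hk.2
        ((headers.map pvNorm).map String.toList)).mpr
      ⟨(pvNorm h).toList, by simp; exact ⟨h, hh, rfl⟩, hin⟩

-- ===== VERDICT =====
theorem header_score_py_spec : Claim_equal_header_score_py := by
  intro headers _
  unfold Spec_header_score_py header_score_py header_score_py_alt pvCats
  simp only [List.foldl_cons, List.foldl_nil, List.filter]
  simp only [b_text_any NAME_KEYS headers (by decide),
      b_text_any ROLE_KEYS headers (by decide),
      b_text_any DATE_KEYS headers (by decide),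
      b_text_any START_KEYS headers (by decide),
      b_text_any END_KEYS headers (by decide),
      b_text_any DEPT_KEYS headers (by decide)]
  simp only [map_contains headers "name" NAME_KEYS (by simp),
      map_contains headers "role" ROLE_KEYS (by simp),
      map_contains headers "date" DATE_KEYS (by simp),
      map_contains headers "start_time" START_KEYS (by simp),
      map_contains headers "end_time" END_KEYS (by simp),
      map_contains headers "department" DEPT_KEYS (by simp)]
  cases h1 : headers.any (fun h => pvAnyIn NAME_KEYS (pvNorm h)) <;>
  cases h2 : headers.any (fun h => pvAnyIn ROLE_KEYS (pvNorm h)) <;>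
  cases h3 : headers.any (fun h => pvAnyIn DATE_KEYS (pvNorm h)) <;>
  cases h4 : headers.any (fun h => pvAnyIn START_KEYS (pvNorm h)) <;>
  cases h5 : headers.any (fun h => pvAnyIn END_KEYS (pvNorm h)) <;>
  cases h6 : headers.any (fun h => pvAnyIn DEPT_KEYS (pvNorm h)) <;>
  decide
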